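-- pv_equiv track=rewrite | github.com/MisterZurg/academy_yandex_Algorithm-Training | Training_6.0/Python/C.py | find_intervals
-- ===== SOURCE A (Python) =====
-- def find_intervals(table, x) -> list[list[int]]:
--     intervals = []
--     current_interval = []
--     in_interval = False
--     for y in range(len(table)):
--         if table[y][x] == "#":
--             if not in_interval:
--                 in_interval = True
--                 current_interval.append(y)
--         else:
--             if in_interval:
--                 current_interval.append(y)
--                 intervals.append(current_interval)
--                 current_interval = []
--                 in_interval = False
--     else:
--         if in_interval:
--             current_interval.append(y + 1)
--             intervals.append(current_interval)
--     return intervals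
-- ===== SOURCE B (Python) =====
-- def find_intervals(table, x) -> list[list[int]]:
--     # Run-scanning: extract the column, then jump run by run with two indices.
--     col = [row[x] for row in table]
--     res = []
--     i, n = 0, len(col)
--     while i < n:
--         j = i
--         while j < n and col[j] == col[i]:
--             j += 1
--         if col[i] == "#":
--             res.append([i, j])
--         i = j
--     return res
-- ===== Notes on version B (the rewrite author's own statement) =====
-- stated objective: alternative
-- what changed: Replaces the in_interval flag state machine over row indices by extracting the column once and scanning it run by run with two indices, emitting [start, end) for each run of '#'.
import Mathlib
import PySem

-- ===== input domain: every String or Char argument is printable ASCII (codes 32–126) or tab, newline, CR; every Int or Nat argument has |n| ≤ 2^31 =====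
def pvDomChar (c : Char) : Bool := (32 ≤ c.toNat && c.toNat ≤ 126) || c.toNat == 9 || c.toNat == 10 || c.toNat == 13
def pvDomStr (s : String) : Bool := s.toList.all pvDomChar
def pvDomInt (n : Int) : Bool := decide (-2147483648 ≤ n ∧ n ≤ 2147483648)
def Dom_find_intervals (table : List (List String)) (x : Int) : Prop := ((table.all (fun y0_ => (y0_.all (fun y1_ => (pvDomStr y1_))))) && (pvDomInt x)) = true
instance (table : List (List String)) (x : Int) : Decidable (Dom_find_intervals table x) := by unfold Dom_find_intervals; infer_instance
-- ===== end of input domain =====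

-- B replaces A's in_interval flag machine over row indices by a run-by-run scan of the extracted column (alternative decomposition, same cost).
-- Pre_ excludes inputs where the column index x is out of range for some row: there both A and B raise IndexError.


-- ===== PORT A =====
-- A's loop state: (intervals, current_interval, in_interval); one step per row index y with value table[y][x].
def fiStepA (st : List (List Int) × List Int × Bool) (p : Int × String) :
    List (List Int) × List Int × Bool :=
  match st with
  | (intervals, cur, inI) =>
    if p.2 == "#" then
      if !inI then (intervals, cur ++ [p.1], true) else (intervals, cur, inI)
    else
      if inI then (intervals ++ [cur ++ [p.1]], [], false) else (intervals, cur, inI)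

def find_intervals (table : List (List String)) (x : Int) : List (List Int) :=
  let n : Int := table.length
  let st := (PySem.List.pyRange 0 n 1).foldl
    (fun st y => fiStepA st (y, PySem.List.pyGetD (PySem.List.pyGetD table y []) x ""))
    ([], [], false)
  -- the for-else close uses y + 1 with y the last index, i.e. n - 1 + 1
  if st.2.2 then st.1 ++ [st.2.1 ++ [n - 1 + 1]] else st.1

-- ===== PORT B =====
-- B's run scanner: the inner while 'j += 1 while col[j] == col[i]' is the takeWhile/dropWhile split of the tail.
def fiRuns (col : List String) (i : Int) : List (List Int) :=
  match col with
  | [] => []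
  | c :: rest =>
    let j : Int := i + 1 + (rest.takeWhile (· == c)).length
    (if c == "#" then [[i, j]] else []) ++ fiRuns (rest.dropWhile (· == c)) j
termination_by col.length
decreasing_by
  simp only [List.length_cons]
  exact Nat.lt_succ_of_le (List.length_dropWhile_le _ _)

def find_intervals_alt (table : List (List String)) (x : Int) : List (List Int) :=
  let col := table.map (fun row => PySem.List.pyGetD row x "")
  fiRuns col 0

-- ===== PRECONDITION & SPEC =====
-- Pre_: x is a valid (possibly negative) Python index into every row; otherwise both A and B raise IndexError.
def Pre_find_intervals (table : List (List String)) (x : Int) : Prop :=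
  ∀ row ∈ table, -(row.length : Int) ≤ x ∧ x < (row.length : Int)
instance (table : List (List String)) (x : Int) : Decidable (Pre_find_intervals table x) := by unfold Pre_find_intervals; infer_instance
def pvWitness_find_intervals : List (List String) × Int := ([[".", "#"], ["#", "#"], ["#", "."]], 0)

def Spec_find_intervals (table : List (List String)) (x : Int) (out : List (List Int)) : Prop := out = find_intervals_alt table x
instance (table : List (List String)) (x : Int) (out : List (List Int)) : Decidable (Spec_find_intervals table x out) := by unfold Spec_find_intervals; infer_instance

-- ===== CLAIM (what is proved, stated in full; the proofs are below) =====
def Claim_equal_find_intervals : Prop := ∀ (table : List (List String)) (x : Int), Dom_find_intervals table x → Pre_find_intervals table x → Spec_find_intervals table x (find_intervals table x)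

-- ===== LEMMAS AND PROOFS =====

-- Proof-only mid-point: the per-element state machine on (index, value) pairs with an optional open start.
def fiM (col : List String) (i : Int) (o : Option Int) : List (List Int) :=
  match col, o with
  | [], none => []
  | [], some s => [[s, i]]
  | c :: rest, none => if c == "#" then fiM rest (i+1) (some i) else fiM rest (i+1) none
  | c :: rest, some s => if c == "#" then fiM rest (i+1) (some s) else [s, i] :: fiM rest (i+1) none

def fiCur (o : Option Int) : List Int := match o with | none => [] | some s => [s]

def fiFinish (e : Int) (st : List (List Int) × List Int × Bool) : List (List Int) :=
  if st.2.2 then st.1 ++ [st.2.1 ++ [e]] else st.1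

theorem fiA_eq_fiM (col : List String) : ∀ (i : Int) (acc : List (List Int)) (o : Option Int),
    fiFinish (i + col.length) (List.foldl fiStepA (acc, fiCur o, o.isSome) (PySem.List.enumerate col i))
      = acc ++ fiM col i o := by
  induction col with
  | nil =>
    intro i acc o
    cases o <;> simp [PySem.List.enumerate_nil, fiFinish, fiCur, fiM]
  | cons c rest ih =>
    intro i acc o
    rw [PySem.List.enumerate_cons]
    have harith : i + ((c :: rest).length : Int) = (i + 1) + (rest.length : Int) := by
      push_cast [List.length_cons]; ring
    rw [harith]
    cases o with
    | none =>
      by_cases h : c = "#"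
      · have hs : fiStepA (acc, fiCur (none : Option Int), Option.isSome (none : Option Int)) (i, c)
            = (acc, fiCur (some i), Option.isSome (some i)) := by
          simp [fiStepA, fiCur, h]
        rw [List.foldl_cons, hs, ih (i + 1) acc (some i)]
        simp [fiM, h]
      · have hs : fiStepA (acc, fiCur (none : Option Int), Option.isSome (none : Option Int)) (i, c)
            = (acc, fiCur none, Option.isSome (none : Option Int)) := by
          simp [fiStepA, fiCur, h]
        rw [List.foldl_cons, hs, ih (i + 1) acc none]
        simp [fiM, h]
    | some s =>
      by_cases h : c = "#"
      · have hs : fiStepA (acc, fiCur (some s), Option.isSome (some s)) (i, c)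
            = (acc, fiCur (some s), Option.isSome (some s)) := by
          simp [fiStepA, fiCur, h]
        rw [List.foldl_cons, hs, ih (i + 1) acc (some s)]
        simp [fiM, h]
      · have hs : fiStepA (acc, fiCur (some s), Option.isSome (some s)) (i, c)
            = (acc ++ [[s, i]], fiCur none, Option.isSome (none : Option Int)) := by
          simp [fiStepA, fiCur, h]
        rw [List.foldl_cons, hs, ih (i + 1) (acc ++ [[s, i]]) none]
        simp [fiM, h]

-- Inside a '#'-run in the open state, fiM closes the interval at the end of the run.
theorem fiM_some_run (rest : List String) : ∀ (k s : Int),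
    fiM rest k (some s)
      = [s, k + ((rest.takeWhile (· == "#")).length : Int)]
          :: fiM (rest.dropWhile (· == "#")) (k + ((rest.takeWhile (· == "#")).length : Int)) none := by
  induction rest with
  | nil => intro k s; simp [fiM]
  | cons c' r ih =>
    intro k s
    by_cases h : c' = "#"
    · have ht : (c' :: r).takeWhile (· == "#") = c' :: r.takeWhile (· == "#") := by
        simp [h]
      have hd : (c' :: r).dropWhile (· == "#") = r.dropWhile (· == "#") := by
        simp [h]
      have harith : k + (((c' :: r.takeWhile (· == "#")).length : Int))
          = (k + 1) + ((r.takeWhile (· == "#")).length : Int) := by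
        push_cast [List.length_cons]; ring
      rw [ht, hd, harith]
      have hm : fiM (c' :: r) k (some s) = fiM r (k + 1) (some s) := by
        simp [fiM, h]
      rw [hm, ih (k + 1) s]
    · have ht : (c' :: r).takeWhile (· == "#") = [] := by
        simp [h]
      have hd : (c' :: r).dropWhile (· == "#") = c' :: r := by
        simp [h]
      have hm : fiM (c' :: r) k (some s) = [s, k] :: fiM r (k + 1) none := by
        simp [fiM, h]
      rw [ht, hd, hm]
      simp [fiM, h]

-- In the closed state, a run of a non-'#' value is skipped without output.
theorem fiM_none_skip (rest : List String) : ∀ (k : Int) (c : String), c ≠ "#" →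
    fiM rest k none
      = fiM (rest.dropWhile (· == c)) (k + ((rest.takeWhile (· == c)).length : Int)) none := by
  induction rest with
  | nil => intro k c _; simp [fiM]
  | cons c' r ih =>
    intro k c hc
    by_cases h : c' = c
    · have ht : (c' :: r).takeWhile (· == c) = c' :: r.takeWhile (· == c) := by
        simp [h]
      have hd : (c' :: r).dropWhile (· == c) = r.dropWhile (· == c) := by
        simp [h]
      have harith : k + (((c' :: r.takeWhile (· == c)).length : Int))
          = (k + 1) + ((r.takeWhile (· == c)).length : Int) := by
        push_cast [List.length_cons]; ring
      have hm : fiM (c' :: r) k none = fiM r (k + 1) none := by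
        have : c' ≠ "#" := h ▸ hc
        simp [fiM, this]
      rw [hm, ht, hd, harith, ih (k + 1) c hc]
    · have ht : (c' :: r).takeWhile (· == c) = [] := by
        simp [h]
      have hd : (c' :: r).dropWhile (· == c) = c' :: r := by
        simp [h]
      rw [ht, hd]; simp

theorem fiM_eq_fiRuns (col : List String) (i : Int) : fiM col i none = fiRuns col i := by
  match col with
  | [] => simp [fiM, fiRuns]
  | c :: rest =>
    rw [fiRuns]
    by_cases h : c = "#"
    · subst h
      have hm : fiM ("#" :: rest) i none = fiM rest (i + 1) (some i) := by
        simp [fiM]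
      rw [hm, fiM_some_run rest (i + 1) i,
          fiM_eq_fiRuns (rest.dropWhile (· == "#")) (i + 1 + ((rest.takeWhile (· == "#")).length : Int))]
      simp [add_assoc]
    · have hm : fiM (c :: rest) i none = fiM rest (i + 1) none := by
        simp [fiM, h]
      rw [hm, fiM_none_skip rest (i + 1) c h,
          fiM_eq_fiRuns (rest.dropWhile (· == c)) (i + 1 + ((rest.takeWhile (· == c)).length : Int))]
      simp [h, add_assoc]
termination_by col.length
decreasing_by
  · simp only [List.length_cons]
    exact Nat.lt_succ_of_le (List.length_dropWhile_le _ _)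
  · simp only [List.length_cons]
    exact Nat.lt_succ_of_le (List.length_dropWhile_le _ _)

-- The column lookup: table[y][x] equals col[y] for col = [row[x] for row in table].
theorem fi_col_lookup (table : List (List String)) (x y : Int) :
    PySem.List.pyGetD (PySem.List.pyGetD table y []) x ""
      = PySem.List.pyGetD (table.map (fun row => PySem.List.pyGetD row x "")) y "" := by
  have hdef : PySem.List.pyGetD ([] : List String) x "" = "" := by
    simp [PySem.List.pyGetD, PySem.List.pyGet?]
  have := PySem.List.pyGetD_map (fun row => PySem.List.pyGetD row x "") table y ([] : List String)
  rw [hdef] at this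
  exact this.symm

theorem fi_main (table : List (List String)) (x : Int) :
    find_intervals table x = find_intervals_alt table x := by
  set col := table.map (fun row => PySem.List.pyGetD row x "") with hcol
  have h1 : find_intervals table x =
      fiFinish ((table.length : Int) - 1 + 1)
        ((PySem.List.pyRange 0 (table.length : Int) 1).foldl
          (fun st y => fiStepA st (y, PySem.List.pyGetD (PySem.List.pyGetD table y []) x ""))
          ([], [], false)) := rfl
  have h2 : find_intervals_alt table x = fiRuns col 0 := rfl
  rw [h1, h2]
  have hstep : (fun (st : List (List Int) × List Int × Bool) (y : Int) =>
        fiStepA st (y, PySem.List.pyGetD (PySem.List.pyGetD table y []) x ""))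
      = fun st y => fiStepA st (y, PySem.List.pyGetD col y "") := by
    funext st y
    rw [fi_col_lookup table x y]
  rw [hstep]
  have hlen : (table.length : Int) = (col.length : Int) := by simp [hcol]
  rw [hlen]
  have hfold : (PySem.List.pyRange 0 (col.length : Int) 1).foldl
        (fun st y => fiStepA st (y, PySem.List.pyGetD col y "")) ([], [], false)
      = List.foldl fiStepA ([], [], false) (PySem.List.enumerate col 0) := by
    rw [PySem.List.enumerate_eq_map_pyRange col "", List.foldl_map]
    rfl
  rw [hfold]
  have he : ((col.length : Int)) - 1 + 1 = ((col.length : Int)) := by ring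
  rw [he]
  have hA : fiFinish ((col.length : Int))
        (List.foldl fiStepA ([], [], false) (PySem.List.enumerate col 0))
      = [] ++ fiM col 0 none := by
    have h := fiA_eq_fiM col 0 [] none
    simpa [fiCur] using h
  rw [hA, fiM_eq_fiRuns col 0]
  simp

-- ===== VERDICT (by name: the statement is the Claim_ definition above) =====
theorem find_intervals_spec : Claim_equal_find_intervals := by
  unfold Claim_equal_find_intervals Spec_find_intervals
  intro table x _ _
  exact fi_main table x
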